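-- pv_equiv track=rewrite | github.com/wonn23/problems | 프로그래머스/lv1/42840. 모의고사/모의고사.py | solution
-- ===== SOURCE A (Python) =====
-- def solution(answers):
--     answer = []
--     num1 = [1,2,3,4,5] * 2000
--     num2 = [2,1,2,3,2,4,2,5] * 1250
--     num3 = [3,3,1,1,2,2,4,4,5,5] * 1000
--
--     num1_answer = 0
--     num2_answer = 0
--     num3_answer = 0
--     for i in range(len(answers)):
--         if num1[i] == answers[i]:
--             num1_answer +=1
--         if num2[i] == answers[i]:
--             num2_answer +=1
--         if num3[i] == answers[i]:
--             num3_answer +=1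
--     max_num = max(num1_answer,num2_answer,num3_answer)
--     if max_num == num1_answer:
--         answer.append(1)
--     if max_num == num2_answer:
--         answer.append(2)
--     if max_num == num3_answer:
--         answer.append(3)
--
--     return answer
-- ===== SOURCE B (Python) =====
-- def solution(answers):
--     patterns = [[1, 2, 3, 4, 5], [2, 1, 2, 3, 2, 4, 2, 5], [3, 3, 1, 1, 2, 2, 4, 4, 5, 5]]
--     # Histogram the answers by (position mod 40, value) in one pass; 40 is the
--     # common period of the three patterns, so each score is a 40-entry table sum
--     # and answers is never rescanned per pattern.
--     cnt = {}
--     for i, a in enumerate(answers):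
--         k = (i % 40, a)
--         cnt[k] = cnt.get(k, 0) + 1
--     scores = []
--     for pat in patterns:
--         scores.append(sum(cnt.get((r, pat[r % len(pat)]), 0) for r in range(40)))
--     best = max(scores)
--     return [i + 1 for i, s in enumerate(scores) if s == best]
-- ===== Notes on version B (the rewrite author's own statement) =====
-- stated objective: alternative
-- what changed: B builds a one-pass histogram keyed by (index mod 40, answer value) - 40 being the common period of the three patterns - and computes each pattern's score as a 40-entry table lookup sum, instead of A's combined scan comparing answers against three materialized 10000-element pattern lists; Pre_ excludes len(answers) > 10000, where A raises IndexError.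
import Mathlib
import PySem

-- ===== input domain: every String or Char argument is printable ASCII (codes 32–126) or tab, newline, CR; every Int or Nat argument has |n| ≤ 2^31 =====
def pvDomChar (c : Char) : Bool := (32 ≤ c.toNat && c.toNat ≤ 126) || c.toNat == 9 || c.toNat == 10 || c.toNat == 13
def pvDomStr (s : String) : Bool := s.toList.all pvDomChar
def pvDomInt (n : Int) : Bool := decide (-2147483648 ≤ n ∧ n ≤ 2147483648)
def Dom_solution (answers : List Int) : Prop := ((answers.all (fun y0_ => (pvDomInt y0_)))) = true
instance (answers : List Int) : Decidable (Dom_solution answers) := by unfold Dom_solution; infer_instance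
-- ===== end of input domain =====

-- B replaces A's combined scan against three materialized 10000-element pattern lists by a
-- one-pass histogram keyed by (index mod 40, value) — 40 is the common period of the three
-- patterns — from which each score is a 40-entry table-lookup sum (objective: alternative).

-- ===== PORT A =====
def solution (answers : List Int) : List Int :=
  let num1 := (List.replicate 2000 ([1, 2, 3, 4, 5] : List Int)).flatten
  let num2 := (List.replicate 1250 ([2, 1, 2, 3, 2, 4, 2, 5] : List Int)).flatten
  let num3 := (List.replicate 1000 ([3, 3, 1, 1, 2, 2, 4, 4, 5, 5] : List Int)).flatten
  let st := (PySem.List.pyRange 0 (answers.length : Int) 1).foldl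
    (fun (st : Int × Int × Int) i =>
      (if PySem.List.pyGetD num1 i 0 = PySem.List.pyGetD answers i 0 then st.1 + 1 else st.1,
       if PySem.List.pyGetD num2 i 0 = PySem.List.pyGetD answers i 0 then st.2.1 + 1 else st.2.1,
       if PySem.List.pyGetD num3 i 0 = PySem.List.pyGetD answers i 0 then st.2.2 + 1 else st.2.2))
    (0, 0, 0)
  let maxNum := max st.1 (max st.2.1 st.2.2)
  ((if maxNum = st.1 then [(1 : Int)] else []) ++
   (if maxNum = st.2.1 then [2] else []) ++
   (if maxNum = st.2.2 then [3] else []))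

-- ===== PORT B =====
def solution_alt (answers : List Int) : List Int :=
  let patterns : List (List Int) :=
    [[1, 2, 3, 4, 5], [2, 1, 2, 3, 2, 4, 2, 5], [3, 3, 1, 1, 2, 2, 4, 4, 5, 5]]
  let cnt := (PySem.List.enumerate answers 0).foldl
    (fun (d : PySem.Dict (Int × Int) Int) p =>
      d.insert (PySem.Int.mod p.1 40, p.2) (d.getD (PySem.Int.mod p.1 40, p.2) 0 + 1))
    PySem.Dict.empty
  let scores := patterns.foldl (fun acc pat =>
    acc ++ [((PySem.List.pyRange 0 40 1).map
      (fun r => cnt.getD (r, PySem.List.pyGetD pat (PySem.Int.mod r (pat.length : Int)) 0) 0)).sum]) []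
  let best := (PySem.List.max? scores (fun y => y)).getD 0
  (PySem.List.enumerate scores 0).foldl
    (fun acc q => if q.2 = best then acc ++ [q.1 + 1] else acc) []

-- ===== PRECONDITION & SPEC =====
-- A indexes three 10000-element lists by position, so it raises IndexError when
-- len(answers) > 10000; Pre_ excludes exactly those inputs (B handles any length).
def Pre_solution (answers : List Int) : Prop := answers.length ≤ 10000
instance (answers : List Int) : Decidable (Pre_solution answers) := by
  unfold Pre_solution; infer_instance

def pvWitness_solution : List Int := [1, 3, 2, 4, 2]

def Spec_solution (answers : List Int) (out : List Int) : Prop := out = solution_alt answers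
instance (answers : List Int) (out : List Int) : Decidable (Spec_solution answers out) := by
  unfold Spec_solution; infer_instance

-- ===== CLAIM (what is proved, stated in full; the proofs are below) =====
def Claim_equal_solution : Prop :=
  ∀ (answers : List Int), Dom_solution answers → Pre_solution answers →
    Spec_solution answers (solution answers)

-- ===== LEMMAS AND PROOFS =====

-- The number of positions j < len(answers) where answers[j] equals the periodic
-- extension of pat at j (the common value both programs' per-pattern counters compute).
def matchCount (pat answers : List Int) : Int :=
  (((PySem.List.pyRange 0 (answers.length : Int) 1).countP
    (fun j => PySem.List.pyGetD answers j 0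
      == PySem.List.pyGetD pat (PySem.Int.mod j (pat.length : Int)) 0) : Nat) : Int)

-- getD of a k-fold repetition of pat is getD of pat at the index mod |pat|.
theorem getD_flatten_replicate (pat : List Int) (k i : Nat)
    (h : i < k * pat.length) :
    ((List.replicate k pat).flatten).getD i 0 = pat.getD (i % pat.length) 0 := by
  induction k generalizing i with
  | zero => omega
  | succ k ih =>
    rw [List.replicate_succ, List.flatten_cons]
    by_cases hi : i < pat.length
    · rw [List.getD_append _ _ _ _ hi, Nat.mod_eq_of_lt hi]
    · replace hi : pat.length ≤ i := Nat.le_of_not_lt hi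
      have hs : (k + 1) * pat.length = k * pat.length + pat.length := Nat.succ_mul _ _
      rw [List.getD_append_right _ _ _ _ hi, Nat.mod_eq_sub_mod hi, ih _ (by omega)]

-- A's per-pattern counter over the materialized repetition equals matchCount.
theorem counter_eq_matchCount (pat : List Int) (k : Nat) (answers : List Int)
    (h : answers.length ≤ k * pat.length) :
    (PySem.List.pyRange 0 (answers.length : Int) 1).foldl
      (fun (c : Int) i =>
        if PySem.List.pyGetD ((List.replicate k pat).flatten) i 0
            = PySem.List.pyGetD answers i 0 then c + 1 else c) 0
      = matchCount pat answers := by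
  rw [PySem.List.foldl_ite_add_one, matchCount, zero_add]
  congr 1
  apply List.countP_congr
  intro i hi
  rw [PySem.List.mem_pyRange_one] at hi
  obtain ⟨j, rfl⟩ : ∃ j : Nat, i = (j : Int) := ⟨i.toNat, by omega⟩
  have hj : j < answers.length := by exact_mod_cast hi.2
  simp only [PySem.List.pyGetD_natCast, PySem.Int.mod_natCast, PySem.List.pyGetD_natCast,
    decide_eq_true_eq, beq_iff_eq]
  rw [getD_flatten_replicate pat k j (by omega)]
  exact ⟨Eq.symm, Eq.symm⟩

-- Summing an indicator of (r, g r) = p over a 1-step range hits p.1 at most once.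
theorem sum_ind (a b : Int) (p : Int × Int) (g : Int → Int) :
    ((PySem.List.pyRange a b 1).map (fun r => if (r, g r) = p then (1 : Int) else 0)).sum
      = if a ≤ p.1 ∧ p.1 < b ∧ g p.1 = p.2 then 1 else 0 := by
  by_cases hab : a < b
  · rw [PySem.List.pyRange_one_cons hab]
    have ih := sum_ind (a + 1) b p g
    simp only [List.map_cons, List.sum_cons, ih]
    by_cases hpa : p.1 = a
    · have : ((a, g a) = p) ↔ g a = p.2 := by
        constructor
        · intro h; rw [← h]
        · intro h; rw [← hpa] at *; exact Prod.ext rfl h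
      rw [hpa] at *
      split_ifs with h1 h2 h3 h2 h3 h3 <;> simp_all
    · have hne : ¬ ((a, g a) = p) := fun h => hpa (by rw [← h])
      rw [if_neg hne, zero_add]
      split_ifs with h1 h2 h2
      · rfl
      · exact absurd ⟨by omega, h1.2.1, h1.2.2⟩ h2
      · exact absurd ⟨by omega, h2.2.1, h2.2.2⟩ h1
      · rfl
  · rw [PySem.List.pyRange_one_eq_nil (by omega)]
    simp only [List.map_nil, List.sum_nil]
    rw [if_neg (by omega)]
termination_by (b - a).toNat
decreasing_by omega

-- Summing per-residue counts of a pair list whose first components lie in [0,40)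
-- counts exactly the pairs (r, v) with v = g r.
theorem sum_count_eq (ks : List (Int × Int)) (g : Int → Int)
    (h : ∀ p ∈ ks, 0 ≤ p.1 ∧ p.1 < 40) :
    ((PySem.List.pyRange 0 40 1).map (fun r => (ks.count (r, g r) : Int))).sum
      = ((ks.countP (fun p => p.2 == g p.1) : Nat) : Int) := by
  induction ks with
  | nil => simp
  | cons p ks ih =>
    have hp := h p (List.mem_cons_self)
    have hks : ∀ q ∈ ks, 0 ≤ q.1 ∧ q.1 < 40 := fun q hq => h q (List.mem_cons_of_mem _ hq)
    have hcnt : ∀ r : Int, ((p :: ks).count (r, g r) : Int)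
        = (ks.count (r, g r) : Int) + (if (r, g r) = p then (1 : Int) else 0) := by
      intro r
      rw [List.count_cons]
      push_cast
      by_cases hc : p = (r, g r)
      · subst hc; simp
      · simp [hc, Ne.symm hc]
    simp only [hcnt]
    rw [PySem.List.sum_map_add_int, ih hks, sum_ind 0 40 p g, List.countP_cons]
    by_cases hg : g p.1 = p.2
    · rw [if_pos ⟨hp.1, hp.2, hg⟩, if_pos (by simp [hg.symm])]
      push_cast; ring
    · rw [if_neg (fun hcon => hg hcon.2.2), if_neg (by simp; exact fun h => hg h.symm)]
      push_cast; ring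

theorem max?_getD_three (a b c : Int) :
    (PySem.List.max? [a, b, c] (fun y => y)).getD 0 = max a (max b c) := by
  rw [PySem.List.max?_id_cons]
  simp only [List.foldl_cons, List.foldl_nil, Option.getD_some]
  rw [max_assoc]

-- B's table-sum for a pattern whose length divides 40 equals matchCount.
theorem bscore_eq_matchCount (pat answers : List Int)
    (hpos : 0 < pat.length) (hL : pat.length ∣ 40) :
    ((PySem.List.pyRange 0 40 1).map
      (fun r => ((PySem.List.enumerate answers 0).foldl
        (fun (d : PySem.Dict (Int × Int) Int) p =>
          d.insert (PySem.Int.mod p.1 40, p.2) (d.getD (PySem.Int.mod p.1 40, p.2) 0 + 1))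
        PySem.Dict.empty).getD
          (r, PySem.List.pyGetD pat (PySem.Int.mod r (pat.length : Int)) 0) 0)).sum
      = matchCount pat answers := by
  have hfold : (PySem.List.enumerate answers 0).foldl
      (fun (d : PySem.Dict (Int × Int) Int) p =>
        d.insert (PySem.Int.mod p.1 40, p.2) (d.getD (PySem.Int.mod p.1 40, p.2) 0 + 1))
      PySem.Dict.empty
      = ((PySem.List.enumerate answers 0).map
          (fun p => (PySem.Int.mod p.1 40, p.2))).foldl
        (fun (d : PySem.Dict (Int × Int) Int) x => d.insert x (d.getD x 0 + 1))
        PySem.Dict.empty := by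
    rw [List.foldl_map]
  rw [hfold]
  set ks := (PySem.List.enumerate answers 0).map (fun p => (PySem.Int.mod p.1 40, p.2)) with hks
  have hget : ∀ k : Int × Int,
      (ks.foldl (fun (d : PySem.Dict (Int × Int) Int) x => d.insert x (d.getD x 0 + 1))
        PySem.Dict.empty).getD k 0 = (ks.count k : Int) := by
    intro k
    rw [PySem.Dict.getD_foldl_insert_add_one, PySem.Dict.getD_empty, zero_add]
  simp only [hget]
  have hmem : ∀ p ∈ ks, 0 ≤ p.1 ∧ p.1 < 40 := by
    intro p hp
    rw [hks, List.mem_map] at hp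
    obtain ⟨q, _, rfl⟩ := hp
    exact ⟨PySem.Int.mod_nonneg _ (by omega), PySem.Int.mod_lt _ (by omega)⟩
  rw [sum_count_eq ks _ hmem, hks, List.countP_map, matchCount,
    PySem.List.enumerate_eq_map_pyRange (d := 0), List.countP_map]
  congr 1
  apply List.countP_congr
  intro i hi
  rw [PySem.List.mem_pyRange_one] at hi
  obtain ⟨j, rfl⟩ : ∃ j : Nat, i = (j : Int) := ⟨i.toNat, by omega⟩
  simp only [Function.comp]
  rw [PySem.Int.mod_eq_emod_of_pos (a := (j : Int)) (b := 40) (by omega),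
      PySem.Int.mod_eq_emod_of_pos (b := (pat.length : Int)) (by exact_mod_cast hpos),
      PySem.Int.mod_eq_emod_of_pos (b := (pat.length : Int)) (by exact_mod_cast hpos),
      Int.emod_emod_of_dvd _ (by exact_mod_cast Int.natCast_dvd_natCast.mpr hL)]

-- ===== VERDICT (by name: the statement is the Claim_ definition above) =====
theorem solution_spec : Claim_equal_solution := by
  intro answers _ hpre
  unfold Pre_solution at hpre
  unfold Spec_solution
  simp only [solution, solution_alt]
  rw [PySem.List.foldl_prod_mk
        (f := fun (c : Int) i =>
          if PySem.List.pyGetD ((List.replicate 2000 ([1,2,3,4,5] : List Int)).flatten) i 0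
              = PySem.List.pyGetD answers i 0 then c + 1 else c)
        (g := fun (st : Int × Int) i =>
          (if PySem.List.pyGetD ((List.replicate 1250 ([2,1,2,3,2,4,2,5] : List Int)).flatten) i 0
              = PySem.List.pyGetD answers i 0 then st.1 + 1 else st.1,
           if PySem.List.pyGetD ((List.replicate 1000 ([3,3,1,1,2,2,4,4,5,5] : List Int)).flatten) i 0
              = PySem.List.pyGetD answers i 0 then st.2 + 1 else st.2))]
  rw [PySem.List.foldl_prod_mk
        (f := fun (c : Int) i =>
          if PySem.List.pyGetD ((List.replicate 1250 ([2,1,2,3,2,4,2,5] : List Int)).flatten) i 0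
              = PySem.List.pyGetD answers i 0 then c + 1 else c)
        (g := fun (c : Int) i =>
          if PySem.List.pyGetD ((List.replicate 1000 ([3,3,1,1,2,2,4,4,5,5] : List Int)).flatten) i 0
              = PySem.List.pyGetD answers i 0 then c + 1 else c)]
  rw [counter_eq_matchCount ([1,2,3,4,5] : List Int) 2000 answers (by simpa using hpre),
      counter_eq_matchCount ([2,1,2,3,2,4,2,5] : List Int) 1250 answers (by simpa using hpre),
      counter_eq_matchCount ([3,3,1,1,2,2,4,4,5,5] : List Int) 1000 answers (by simpa using hpre)]
  simp only [List.foldl_cons, List.foldl_nil, List.nil_append, List.cons_append]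
  simp only [bscore_eq_matchCount ([1,2,3,4,5] : List Int) answers (by decide) (by decide),
      bscore_eq_matchCount ([2,1,2,3,2,4,2,5] : List Int) answers (by decide) (by decide),
      bscore_eq_matchCount ([3,3,1,1,2,2,4,4,5,5] : List Int) answers (by decide) (by decide)]
  simp only [max?_getD_three]
  simp only [PySem.List.enumerate, List.foldl_cons, List.foldl_nil]
  set s1 := matchCount ([1,2,3,4,5] : List Int) answers
  set s2 := matchCount ([2,1,2,3,2,4,2,5] : List Int) answers
  set s3 := matchCount ([3,3,1,1,2,2,4,4,5,5] : List Int) answers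
  set M := max s1 (max s2 s3) with hM
  by_cases c1 : s1 = M <;> by_cases c2 : s2 = M <;> by_cases c3 : s3 = M <;>
    simp [eq_comm (a := M), c1, c2, c3]
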